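-- pv_equiv track=rewrite | github.com/InuTheGreat/Advent-of-Code | 2022/Day 3/Elves3.py | trinity_group
-- ===== SOURCE A (Python) =====
-- def shared_in_three(m1, m2, m3):
--     for temp in m1:
--         if(temp in m2 and temp in m3):
--             return temp
--
-- def trinity_group(some_list):
--     #if a is in x and in z
--     list_of_trinity = []
--     counter = 0
--     member0 = []
--     member1 = []
--     member2 = []
--     for a in some_list:
--         if counter == 0:
--             member0 = a
--             counter = 1
--         elif counter == 1:
--             member1 = a
--             counter = 2
--         elif counter == 2:
--             member2 = a
--             member_of_trinity = shared_in_three(member0, member1, member2)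
--             list_of_trinity.append(member_of_trinity)
--             counter = 0
--     return list_of_trinity
-- ===== SOURCE B (Python) =====
-- def trinity_group(some_list):
--     def pick(a, b, c):
--         common = set(a) & set(b) & set(c)
--         return min(common, key=a.index) if common else None
--     return [pick(some_list[3 * k], some_list[3 * k + 1], some_list[3 * k + 2])
--             for k in range(len(some_list) // 3)]
-- ===== Notes on version B (the rewrite author's own statement) =====
-- stated objective: alternative
-- what changed: Instead of scanning the first string testing each char for membership in the other two (A), B computes the three-way set intersection and then selects its element with the minimal first-occurrence index in a (argmin by a.index); grouping is by direct index arithmetic over range(len//3) instead of A's counter/member0-2 state machine.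
import Mathlib
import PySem

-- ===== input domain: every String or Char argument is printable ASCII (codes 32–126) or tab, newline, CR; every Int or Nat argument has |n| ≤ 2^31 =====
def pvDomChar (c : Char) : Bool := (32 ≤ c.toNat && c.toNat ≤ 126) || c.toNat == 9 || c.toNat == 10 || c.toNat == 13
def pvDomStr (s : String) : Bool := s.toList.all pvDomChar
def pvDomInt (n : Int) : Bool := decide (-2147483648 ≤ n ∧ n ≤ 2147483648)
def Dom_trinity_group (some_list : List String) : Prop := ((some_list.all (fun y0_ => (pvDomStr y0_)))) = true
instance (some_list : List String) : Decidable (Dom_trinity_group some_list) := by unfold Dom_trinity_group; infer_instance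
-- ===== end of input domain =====

-- B replaces A's first-match membership scan by a three-way set intersection followed by
-- an argmin over first-occurrence indices, and A's counter state machine by direct
-- index arithmetic over the group count; objective: alternative.

-- ===== PORT A =====
-- helper: shared_in_three(m1,m2,m3) — first 1-char string of m1 that is a substring of m2 and m3
def sharedInThree (m1 m2 m3 : String) : Option String :=
  (m1.toList.find? (fun temp =>
      PySem.Str.isIn (String.ofList [temp]) m2 && PySem.Str.isIn (String.ofList [temp]) m3)).map
    (fun temp => String.ofList [temp])

-- the body of A's for-loop, as a step on the state (counter, member0, member1, member2, acc)
def trinityStep (st : Int × String × String × String × List (Option String)) (a : String) :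
    Int × String × String × String × List (Option String) :=
  let (counter, m0, m1, m2, acc) := st
  if counter == 0 then (1, a, m1, m2, acc)
  else if counter == 1 then (2, m0, a, m2, acc)
  else if counter == 2 then (0, m0, m1, a, acc ++ [sharedInThree m0 m1 a])
  else st

def trinity_group (some_list : List String) : List (Option String) :=
  (some_list.foldl trinityStep (0, "", "", "", [])).2.2.2.2

-- ===== PORT B =====
-- helper pick(a,b,c): common = set(a) & set(b) & set(c); min(common, key=a.index) if common else None
-- (Python's min iterates the set in hash order, but key a.index is injective on common ⊆ set(a),
-- so the argmin is order-independent; min? is exact. min? = none exactly when common is empty.)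
def pickShared (a b c : String) : Option String :=
  let common : PySem.Set Char :=
    PySem.Set.inter (PySem.Set.inter (PySem.Set.ofList a.toList) b.toList) c.toList
  (PySem.List.min? common (fun ch => a.toList.idxOf ch)).map (fun ch => String.ofList [ch])

-- [pick(some_list[3k], some_list[3k+1], some_list[3k+2]) for k in range(len//3)]
-- (all three indices are < length, so plain getD is exact Python indexing here)
def trinity_group_alt (some_list : List String) : List (Option String) :=
  (List.range (some_list.length / 3)).map (fun k =>
    pickShared (some_list.getD (3 * k) "") (some_list.getD (3 * k + 1) "")
      (some_list.getD (3 * k + 2) ""))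

-- ===== PRECONDITION & SPEC =====
def Spec_trinity_group (some_list : List String) (out : List (Option String)) : Prop := out = trinity_group_alt some_list
instance (some_list : List String) (out : List (Option String)) : Decidable (Spec_trinity_group some_list out) := by unfold Spec_trinity_group; infer_instance

-- ===== CLAIM (what is proved, stated in full; the proofs are below) =====
def Claim_equal_trinity_group : Prop := ∀ (some_list : List String), Dom_trinity_group some_list → Spec_trinity_group some_list (trinity_group some_list)

-- ===== LEMMAS AND PROOFS =====
lemma singleton_infix {α : Type} (a : α) (l : List α) : [a] <:+: l ↔ a ∈ l := by
  constructor
  · intro h; simpa using h.sublist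
  · intro h
    obtain ⟨s, t, rfl⟩ := List.append_of_mem h
    exact ⟨s, t, by simp⟩

lemma mem_common (a b c : String) (ch : Char) :
    ch ∈ PySem.Set.inter (PySem.Set.inter (PySem.Set.ofList a.toList) b.toList) c.toList ↔
      ch ∈ a.toList ∧ ch ∈ b.toList ∧ ch ∈ c.toList := by
  simp only [PySem.Set.inter, List.mem_filter, PySem.Set.mem_ofList, PySem.Set.contains_iff]
  tauto

-- the heart: A's first-match scan computes B's argmin of the intersection
lemma shared_eq (a b c : String) : sharedInThree a b c = pickShared a b c := by
  unfold sharedInThree pickShared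
  set p : Char → Bool := fun temp =>
    PySem.Str.isIn (String.ofList [temp]) b && PySem.Str.isIn (String.ofList [temp]) c with hp
  have hpiff : ∀ ch : Char, p ch = true ↔ ch ∈ b.toList ∧ ch ∈ c.toList := by
    intro ch
    simp [hp, PySem.Str.isIn_eq, PySem.Chars.isIn_iff_infix, singleton_infix]
  set common : PySem.Set Char :=
    PySem.Set.inter (PySem.Set.inter (PySem.Set.ofList a.toList) b.toList) c.toList with hc
  cases hf : a.toList.find? p with
  | none =>
    have hempty : common = [] := by
      rw [List.eq_nil_iff_forall_not_mem]
      intro ch hch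
      rw [hc, mem_common] at hch
      have := List.find?_eq_none.mp hf ch hch.1
      exact this ((hpiff ch).mpr hch.2)
    simp [hempty]
  | some ch =>
    obtain ⟨hpch, pre, suf, hsplit, hpre⟩ := List.find?_eq_some_iff_append.mp hf
    have hcmem : ch ∈ common := by
      rw [hc, mem_common]
      exact ⟨by rw [hsplit]; simp, (hpiff ch).mp hpch⟩
    cases hm : PySem.List.min? common (fun x => a.toList.idxOf x) with
    | none =>
      have h0 : common = [] := (PySem.List.min?_eq_none_iff _ _).mp hm
      rw [h0] at hcmem
      cases hcmem
    | some m =>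
      have hmmem : m ∈ common := PySem.List.min?_mem hm
      have hmin : ∀ y ∈ common, a.toList.idxOf m ≤ a.toList.idxOf y :=
        fun y hy => PySem.List.min?_isMin hm y hy
      -- ch ∉ pre (pre fails p), so idxOf ch = pre.length; m ∉ pre likewise, so idxOf m ≥ pre.length
      have hchpre : ch ∉ pre := fun h => by simpa [hpch] using hpre ch h
      have hmcomm := hmmem
      rw [hc, mem_common] at hmcomm
      have hmpre : m ∉ pre := fun h => by
        simpa [(hpiff m).mpr hmcomm.2] using hpre m h
      have hidxch : a.toList.idxOf ch = pre.length := by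
        rw [hsplit, List.idxOf_append_of_notMem hchpre]; simp
      have hidxm : pre.length ≤ a.toList.idxOf m := by
        rw [hsplit, List.idxOf_append_of_notMem hmpre]; omega
      have hle : a.toList.idxOf m ≤ pre.length := hidxch ▸ hmin ch hcmem
      have hidx : a.toList.idxOf m = a.toList.idxOf ch := by omega
      have hma : m ∈ a.toList := hmcomm.1
      have hmch : m = ch := by
        have h1 : a.toList.idxOf m < a.toList.length := List.idxOf_lt_length_of_mem hma
        have h2 : a.toList[a.toList.idxOf m] = m := List.getElem_idxOf h1
        have h3 : a.toList[a.toList.idxOf ch]'(by rw [← hidx]; exact h1) = ch :=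
          List.getElem_idxOf (by rw [← hidx]; exact h1)
        rw [← h2, ← h3]
        exact getElem_congr rfl hidx h1
      simp only []
      rw [show (PySem.List.min? common fun ch => List.idxOf ch a.toList) = some m from hm]
      simp [hmch]

-- alt steps three elements at a time
lemma alt_cons3 (a b c : String) (rest : List String) :
    trinity_group_alt (a :: b :: c :: rest) = pickShared a b c :: trinity_group_alt rest := by
  unfold trinity_group_alt
  have hlen : (a :: b :: c :: rest).length / 3 = rest.length / 3 + 1 := by
    simp [List.length_cons]; omega
  rw [hlen, List.range_succ_eq_map, List.map_cons, List.map_map]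
  refine congrArg₂ (· :: ·) rfl ?_
  apply List.map_congr_left
  intro k _
  have h0 : 3 * (k + 1) = 3 * k + 1 + 1 + 1 := by ring
  simp [Function.comp, h0]

lemma alt_nil : trinity_group_alt [] = [] := by simp [trinity_group_alt]

lemma alt_one (a : String) : trinity_group_alt [a] = [] := by
  simp [trinity_group_alt]

lemma alt_two (a b : String) : trinity_group_alt [a, b] = [] := by
  simp [trinity_group_alt]

lemma loop_eq : ∀ (l : List String) (x y z : String) (acc : List (Option String)),
    (List.foldl trinityStep (0, x, y, z, acc) l).2.2.2.2 = acc ++ trinity_group_alt l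
  | [], _, _, _, _ => by simp [alt_nil]
  | [a], _, _, _, _ => by simp [alt_one, trinityStep]
  | [a, b], _, _, _, _ => by simp [alt_two, trinityStep]
  | a :: b :: c :: rest, x, y, z, acc => by
    simp only [List.foldl_cons, trinityStep]
    norm_num
    rw [loop_eq rest]
    simp [alt_cons3, shared_eq]

-- ===== VERDICT (by name: the statement is the Claim_ definition above) =====
theorem trinity_group_spec : Claim_equal_trinity_group := by
  intro some_list _
  unfold Spec_trinity_group trinity_group
  simpa using loop_eq some_list "" "" "" []
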